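-- pv_equiv track=rewrite | github.com/tipa16384/adventofcode | 2023/puzzle14a.py | load_sum
-- ===== SOURCE A (Python) =====
-- def load_sum(a):
--     rslt = 0
--     current_load = 1
--     for xI in range(len(a) - 1, -1, -1):
--         for xJ in range(len(a[xI])):
--             if a[xI][xJ] == 'O':
--                 rslt += current_load
--         current_load += 1
--     return rslt
-- ===== SOURCE B (Python) =====
-- def load_sum(a):
--     running = 0
--     rslt = 0
--     for row in a:
--         running += row.count('O')
--         rslt += running
--     return rslt
-- ===== Notes on version B (the rewrite author's own statement) =====
-- stated objective: simpler
-- what changed: Replaces the bottom-up index loop with an explicit weight multiplier by a single top-down pass over rows maintaining a running prefix count of 'O's, adding that running count per row (prefix-sum identity: weight R-i = number of rows at index >= i).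
import Mathlib
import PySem

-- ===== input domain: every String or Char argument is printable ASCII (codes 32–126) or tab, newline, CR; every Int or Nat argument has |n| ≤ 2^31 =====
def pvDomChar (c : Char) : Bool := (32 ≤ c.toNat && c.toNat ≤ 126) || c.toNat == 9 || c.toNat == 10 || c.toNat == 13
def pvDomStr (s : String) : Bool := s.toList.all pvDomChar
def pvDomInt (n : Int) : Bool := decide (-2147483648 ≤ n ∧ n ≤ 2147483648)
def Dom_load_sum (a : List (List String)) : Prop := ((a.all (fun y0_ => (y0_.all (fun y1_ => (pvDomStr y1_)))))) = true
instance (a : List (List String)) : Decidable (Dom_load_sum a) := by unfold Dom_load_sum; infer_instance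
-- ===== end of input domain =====

-- B replaces A's bottom-up loop with an explicit weight by a top-down pass keeping a running
-- prefix count of 'O's (simpler decomposition; same cost).

-- ===== PORT A =====
def load_sum (a : List (List String)) : Int :=
  ((PySem.List.pyRange ((a.length : Int) - 1) (-1) (-1)).foldl
    (fun (st : Int × Int) xI =>
      let row := PySem.List.pyGetD a xI []
      let r := (PySem.List.pyRange 0 (row.length : Int) 1).foldl
        (fun r xJ => if PySem.List.pyGetD row xJ "" = "O" then r + st.2 else r) st.1
      (r, st.2 + 1))
    (0, 1)).1

-- ===== PORT B =====
def load_sum_alt (a : List (List String)) : Int :=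
  (a.foldl
    (fun (st : Int × Int) row =>
      let running := st.1 + (PySem.List.count row "O" : Int)
      (running, st.2 + running))
    (0, 0)).2

-- ===== PRECONDITION & SPEC =====
def Spec_load_sum (a : List (List String)) (out : Int) : Prop := out = load_sum_alt a
instance (a : List (List String)) (out : Int) : Decidable (Spec_load_sum a out) := by unfold Spec_load_sum; infer_instance

-- ===== CLAIM (what is proved, stated in full; the proofs are below) =====
def Claim_equal_load_sum : Prop := ∀ (a : List (List String)), Dom_load_sum a → Spec_load_sum a (load_sum a)

-- ===== LEMMAS AND PROOFS =====

-- weighted sum, reading rows from the bottom (reversed list), weights l, l+1, …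
def pvGrev (xs : List (List String)) (l : Int) : Int :=
  match xs with
  | [] => 0
  | x :: rest => l * (PySem.List.count x "O" : Int) + pvGrev rest (l + 1)

theorem pvGrev_append_singleton (xs : List (List String)) (x : List String) (l : Int) :
    pvGrev (xs ++ [x]) l = pvGrev xs l + (l + xs.length) * (PySem.List.count x "O" : Int) := by
  induction xs generalizing l with
  | nil => simp [pvGrev]
  | cons y ys ih =>
    simp [pvGrev, ih (l + 1)]
    ring

-- A's inner loop counts 'O's weighted by the current load
theorem pv_inner (row : List String) (r l : Int) :
    row.foldl (fun r x => if x = "O" then r + l else r) r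
      = r + l * (PySem.List.count row "O" : Int) := by
  induction row generalizing r with
  | nil => simp
  | cons y ys ih =>
    by_cases h : y = "O" <;> simp [List.foldl_cons, h, ih] <;> ring

-- A's outer loop body, named so the fold can be rewritten
def pvF (a : List (List String)) (st : Int × Int) (xI : Int) : Int × Int :=
  ((PySem.List.pyRange 0 (((PySem.List.pyGetD a xI []).length : Int)) 1).foldl
    (fun r xJ => if PySem.List.pyGetD (PySem.List.pyGetD a xI []) xJ "" = "O" then r + st.2 else r)
    st.1,
   st.2 + 1)

theorem pvF_append_last (xs : List (List String)) (x : List String) (st : Int × Int) :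
    pvF (xs ++ [x]) st ((xs.length : Int)) = (st.1 + st.2 * (PySem.List.count x "O" : Int), st.2 + 1) := by
  have hget : PySem.List.pyGetD (xs ++ [x]) ((xs.length : Nat) : Int) [] = x := by
    rw [PySem.List.pyGetD_natCast]
    simp
  unfold pvF
  rw [hget, PySem.List.foldl_pyRange_zero_pyGetD' x "" (fun acc e => if e = "O" then acc + st.2 else acc) st.1, pv_inner]

theorem pvF_append_frozen (xs : List (List String)) (x : List String) (st : Int × Int)
    (i : Int) (h0 : 0 ≤ i) (h1 : i < (xs.length : Int)) :
    pvF (xs ++ [x]) st i = pvF xs st i := by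
  have hget : PySem.List.pyGetD (xs ++ [x]) i [] = PySem.List.pyGetD xs i [] := by
    obtain ⟨k, rfl⟩ : ∃ k : Nat, i = (k : Int) := ⟨i.toNat, by omega⟩
    have hk : k < xs.length := by exact_mod_cast h1
    rw [PySem.List.pyGetD_natCast, PySem.List.pyGetD_natCast]
    rw [List.getD_append _ _ _ _ hk]
  unfold pvF
  rw [hget]

-- A's outer loop, unrolled from the last row
theorem pv_outer (a : List (List String)) (r l : Int) :
    ((PySem.List.pyRange ((a.length : Int) - 1) (-1) (-1)).foldl (pvF a) (r, l)).1
      = r + pvGrev a.reverse l := by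
  induction a using List.reverseRecOn generalizing r l with
  | nil =>
    rw [PySem.List.pyRange_neg_one_eq_nil (by norm_num)]
    simp [pvGrev]
  | append_singleton xs x ih =>
    have hn : (-1 : Int) < ((xs ++ [x]).length : Int) - 1 := by
      simp; omega
    rw [PySem.List.pyRange_neg_one_cons hn]
    have hidx : ((xs ++ [x]).length : Int) - 1 = ((xs.length : Nat) : Int) := by
      simp
    rw [List.foldl_cons, hidx, pvF_append_last]
    rw [PySem.List.foldl_congr_mem (l := PySem.List.pyRange ((xs.length : Int) - 1) (-1) (-1))
      (init := ((r, l).1 + (r, l).2 * (PySem.List.count x "O" : Int), (r, l).2 + 1))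
      (f := pvF (xs ++ [x])) (g := pvF xs)
      (by
        intro acc i hi
        rw [PySem.List.mem_pyRange_neg_one] at hi
        exact pvF_append_frozen xs x acc i (by omega) (by omega))]
    rw [ih, List.reverse_append]
    simp [pvGrev]
    ring

-- B's loop: the running prefix count contributes its value once per remaining row
theorem pv_alt (a : List (List String)) (run r : Int) :
    (a.foldl
      (fun (st : Int × Int) row =>
        let running := st.1 + (PySem.List.count row "O" : Int)
        (running, st.2 + running))
      (run, r)).2 = r + run * a.length + pvGrev a.reverse 1 := by
  induction a generalizing run r with
  | nil => simp [pvGrev]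
  | cons y ys ih =>
    simp only [List.foldl_cons, ih, List.reverse_cons, pvGrev_append_singleton,
      List.length_cons, List.length_reverse]
    push_cast
    ring

-- ===== VERDICT (by name: the statement is the Claim_ definition above) =====
theorem load_sum_spec : Claim_equal_load_sum := by
  intro a _
  unfold Spec_load_sum load_sum_alt
  have hA : load_sum a
      = ((PySem.List.pyRange ((a.length : Int) - 1) (-1) (-1)).foldl (pvF a) (0, 1)).1 := rfl
  rw [hA, pv_outer, pv_alt]
  simp
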